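-- pv_equiv track=rewrite | github.com/Rkunwar25/LeetCodeSolutions | 1961-check-if-string-is-a-prefix-of-array/1961-check-if-string-is-a-prefix-of-array.py | isPrefixString
-- ===== SOURCE A (Python) =====
-- from typing import List
--
-- def isPrefixString(s: str, words: List[str]) -> bool:
--     result=False
--     join=""
--     for i in words:
--         join+=i
--         if s.startswith(join) and len(join)<len(s):
--             continue
--         elif s.startswith(join) and len(join)==len(s):
--             result=True
--             break
--         else:
--             result=False
--             break
--     return result
-- ===== SOURCE B (Python) =====
-- from typing import List
--
-- def isPrefixString(s: str, words: List[str]) -> bool: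
--     pos = 0
--     for w in words:
--         if s[pos:pos+len(w)] != w:
--             return False
--         pos += len(w)
--         if pos == len(s):
--             return True
--     return False
-- ===== Notes on version B (the rewrite author's own statement) =====
-- stated objective: alternative
-- what changed: B keeps a single integer offset and compares each word against the slice of s at that offset, instead of rebuilding the growing concatenation and re-running startswith on it each iteration; same return values, avoids string re-concatenation.
import Mathlib
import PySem

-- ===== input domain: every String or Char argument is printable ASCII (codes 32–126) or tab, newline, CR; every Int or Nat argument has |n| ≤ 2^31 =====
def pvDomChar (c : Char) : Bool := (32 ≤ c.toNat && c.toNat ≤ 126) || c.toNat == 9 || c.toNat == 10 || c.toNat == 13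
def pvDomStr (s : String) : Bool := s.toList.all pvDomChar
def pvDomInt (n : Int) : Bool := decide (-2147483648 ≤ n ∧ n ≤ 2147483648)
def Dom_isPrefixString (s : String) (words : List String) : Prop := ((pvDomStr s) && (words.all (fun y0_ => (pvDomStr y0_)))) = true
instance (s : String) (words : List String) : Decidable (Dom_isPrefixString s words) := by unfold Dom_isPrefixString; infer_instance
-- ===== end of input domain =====

-- B replaces A's rebuilt concatenation + repeated startswith by one integer offset and a per-word slice comparison (objective: alternative).

-- ===== PORT A =====
-- the for-loop of A: state is the accumulated concatenation `join` (as chars);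
-- falling off the loop yields the last value of `result`, which is False there.
def pvALoop (s : List Char) (join : List Char) : List String → Bool
  | [] => false
  | w :: ws =>
    let j := join ++ w.toList
    if PySem.Chars.startswith s j && decide (j.length < s.length) then
      pvALoop s j ws
    else if PySem.Chars.startswith s j && decide (j.length = s.length) then
      true
    else
      false

def isPrefixString (s : String) (words : List String) : Bool :=
  pvALoop s.toList [] words

-- ===== PORT B =====
-- the for-loop of B: state is the current offset `pos`; s[pos:pos+len(w)] is a PySem slice.
def pvBLoop (s : List Char) (pos : Nat) : List String → Bool
  | [] => false
  | w :: ws =>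
    if PySem.List.slice s (some (pos : Int)) (some ((pos : Int) + (w.toList.length : Int))) ≠ w.toList then
      false
    else
      let pos' := pos + w.toList.length
      if pos' = s.length then true
      else pvBLoop s pos' ws

def isPrefixString_alt (s : String) (words : List String) : Bool :=
  pvBLoop s.toList 0 words

-- ===== PRECONDITION & SPEC =====
def Spec_isPrefixString (s : String) (words : List String) (out : Bool) : Prop := out = isPrefixString_alt s words
instance (s : String) (words : List String) (out : Bool) : Decidable (Spec_isPrefixString s words out) := by unfold Spec_isPrefixString; infer_instance

-- ===== CLAIM (what is proved, stated in full; the proofs are below) =====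
def Claim_equal_isPrefixString : Prop := ∀ (s : String) (words : List String), Dom_isPrefixString s words → Spec_isPrefixString s words (isPrefixString s words)

-- ===== LEMMAS AND PROOFS =====

-- B's slice test at offset p equals "w is a prefix of s.drop p"
lemma slice_eq_iff_prefix (s : List Char) (p : Nat) (w : List Char) :
    PySem.List.slice s (some (p : Int)) (some ((p : Int) + (w.length : Int))) = w ↔ w <+: s.drop p := by
  rw [PySem.List.slice_natCast_add, eq_comm, ← List.prefix_iff_eq_take]

-- A's startswith test on (take p s ++ w) equals the same prefix condition
lemma startswith_iff_prefix (s : List Char) (p : Nat) (w : List Char) :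
    PySem.Chars.startswith s (s.take p ++ w) = true ↔ w <+: s.drop p := by
  have h := List.prefix_append_right_inj (l₁ := w) (l₂ := s.drop p) (s.take p)
  rw [List.take_append_drop] at h
  rw [PySem.Chars.startswith_iff]
  exact h

-- main loop invariant: A's join is the length-p prefix of s
lemma loop_eq (ws : List String) (s : List Char) (p : Nat) (hp : p ≤ s.length) :
    pvALoop s (s.take p) ws = pvBLoop s p ws := by
  induction ws generalizing p with
  | nil => rfl
  | cons w ws ih =>
    simp only [pvALoop, pvBLoop]
    have hlen : (s.take p ++ w.toList).length = p + w.toList.length := by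
      simp [List.length_take, Nat.min_eq_left hp]
    by_cases hpre : w.toList <+: s.drop p
    · have hsw : PySem.Chars.startswith s (s.take p ++ w.toList) = true :=
        (startswith_iff_prefix s p w.toList).2 hpre
      have hsl : PySem.List.slice s (some (p : Int)) (some ((p : Int) + (w.toList.length : Int))) = w.toList :=
        (slice_eq_iff_prefix s p w.toList).2 hpre
      have hle : p + w.toList.length ≤ s.length := by
        have h1 := hpre.length_le
        rw [List.length_drop] at h1
        omega
      rw [if_neg (show ¬ _ ≠ w.toList from fun h => h hsl)]
      by_cases hlt : p + w.toList.length < s.length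
      · rw [if_pos (show (_ && _) = true by rw [hsw, hlen]; simp only [Bool.true_and, decide_eq_true_eq]; exact hlt)]
        rw [if_neg (show ¬ (p + w.toList.length = s.length) by omega)]
        have hw : w.toList = (s.drop p).take w.toList.length := List.prefix_iff_eq_take.mp hpre
        have hj : s.take p ++ w.toList = s.take (p + w.toList.length) := by
          rw [List.take_add, ← hw]
        rw [hj]
        exact ih (p + w.toList.length) hle
      · have heq : p + w.toList.length = s.length := by omega
        rw [if_neg (show ¬ (_ && _) = true by rw [hsw, hlen]; simp only [Bool.true_and, decide_eq_true_eq]; exact hlt)]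
        rw [if_pos (show (_ && _) = true by rw [hsw, hlen]; simp only [Bool.true_and, decide_eq_true_eq]; exact heq)]
        rw [if_pos heq]
    · have hsw : PySem.Chars.startswith s (s.take p ++ w.toList) = false := by
        rw [← Bool.not_eq_true]
        exact fun h => hpre ((startswith_iff_prefix s p w.toList).1 h)
      have hsl : PySem.List.slice s (some (p : Int)) (some ((p : Int) + (w.toList.length : Int))) ≠ w.toList :=
        fun h => hpre ((slice_eq_iff_prefix s p w.toList).1 h)
      rw [if_neg (show ¬ (_ && _) = true by rw [hsw]; simp)]
      rw [if_neg (show ¬ (_ && _) = true by rw [hsw]; simp)]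
      rw [if_pos hsl]

-- ===== VERDICT (by name: the statement is the Claim_ definition above) =====
theorem isPrefixString_spec : Claim_equal_isPrefixString := by
  intro s words _
  show isPrefixString s words = isPrefixString_alt s words
  unfold isPrefixString isPrefixString_alt
  have := loop_eq words s.toList 0 (Nat.zero_le _)
  simpa using this
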